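-- pv_equiv track=rewrite | github.com/candidagenome/cgd-backend | cgd/api/services/webprimer_service.py | _calculate_end_annealing
-- ===== SOURCE A (Python) =====
-- def _calculate_end_annealing(seq1: str, seq2: str) -> int:
--     """
--     Calculate 3' end annealing score.
--
--     Checks for annealing at the 3' end which can cause primer-dimer.
--     """
--     seq1 = seq1.upper()
--     seq2 = seq2.upper()
--
--     # Pad shorter sequence
--     len_diff = len(seq1) - len(seq2)
--     if len_diff < 0:
--         seq1 = "N" * abs(len_diff) + seq1
--     elif len_diff > 0:
--         seq2 = "N" * len_diff + seq2
--
--     max_score = 0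
--
--     for offset in range(len(seq2)):
--         score = 0
--         started = False
--
--         for i in range(len(seq2) - offset):
--             b1 = seq1[i]
--             b2 = seq2[len(seq2) - 1 - i - offset]
--
--             if (b1 == "G" and b2 == "C") or (b1 == "C" and b2 == "G"):
--                 score += 4
--                 started = True
--             elif (b1 == "A" and b2 == "T") or (b1 == "T" and b2 == "A"):
--                 score += 2
--                 started = True
--             else:
--                 if started:
--                     break  # Stop at first mismatch after annealing starts
--
--         if score > max_score:
--             max_score = score
--
--     return max_score
-- ===== SOURCE B (Python) =====
-- _PAIR_SCORE = {("G", "C"): 4, ("C", "G"): 4, ("A", "T"): 2, ("T", "A"): 2}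
--
--
-- def _first_run_sum(xs):
--     """Sum of the first contiguous block of nonzero entries in xs."""
--     i = 0
--     while i < len(xs) and xs[i] == 0:
--         i += 1
--     j = i
--     while j < len(xs) and xs[j] != 0:
--         j += 1
--     return sum(xs[i:j])
--
--
-- def _calculate_end_annealing(seq1: str, seq2: str) -> int:
--     seq1 = seq1.upper()
--     seq2 = seq2.upper()
--
--     len_diff = len(seq1) - len(seq2)
--     if len_diff < 0:
--         seq1 = "N" * abs(len_diff) + seq1
--     elif len_diff > 0:
--         seq2 = "N" * len_diff + seq2
--
--     n = len(seq2)
--     best = 0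
--     for offset in range(n):
--         diag = [
--             _PAIR_SCORE.get((seq1[i], seq2[n - 1 - i - offset]), 0)
--             for i in range(n - offset)
--         ]
--         best = max(best, _first_run_sum(diag))
--     return best
-- ===== Notes on version B (the rewrite author's own statement) =====
-- stated objective: alternative
-- what changed: A's stateful inner loop (score/started accumulator with break) is replaced by building each diagonal's list of per-position pair scores from a lookup table and summing its first contiguous nonzero run (drop leading zeros, take the run); the maximum over offsets is unchanged.
import Mathlib
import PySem

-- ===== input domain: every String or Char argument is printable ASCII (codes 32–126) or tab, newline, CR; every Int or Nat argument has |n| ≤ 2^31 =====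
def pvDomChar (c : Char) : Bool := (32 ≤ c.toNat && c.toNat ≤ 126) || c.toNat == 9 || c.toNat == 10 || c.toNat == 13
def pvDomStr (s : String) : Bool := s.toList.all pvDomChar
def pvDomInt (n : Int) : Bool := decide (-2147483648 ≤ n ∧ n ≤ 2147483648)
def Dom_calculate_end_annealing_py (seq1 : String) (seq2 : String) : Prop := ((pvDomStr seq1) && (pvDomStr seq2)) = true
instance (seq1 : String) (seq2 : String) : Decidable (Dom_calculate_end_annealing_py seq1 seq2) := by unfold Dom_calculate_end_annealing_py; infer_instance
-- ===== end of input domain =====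

-- B computes each diagonal's score as the sum of the first contiguous nonzero run of
-- per-position pair scores (drop leading zeros, take the first run) instead of A's
-- stateful started/break loop; objective: alternative decomposition, same cost.

-- ===== PORT A =====
-- inner 'for i in range(len(seq2) - offset)' loop of A, with its 'break' as early return.
-- Indices i and n - 1 - i - offset are always in range (after padding both lists have
-- length n and i < n - offset), so getD is exact for Python's seq[index] here.
def pvLoopA (s1 s2 : List Char) (n offset : Nat) : List Nat → Int → Bool → Int
  | [], score, _ => score
  | i :: rest, score, started =>
    let b1 := s1.getD i ' '
    let b2 := s2.getD (n - 1 - i - offset) ' '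
    if (b1 = 'G' ∧ b2 = 'C') ∨ (b1 = 'C' ∧ b2 = 'G') then
      pvLoopA s1 s2 n offset rest (score + 4) true
    else if (b1 = 'A' ∧ b2 = 'T') ∨ (b1 = 'T' ∧ b2 = 'A') then
      pvLoopA s1 s2 n offset rest (score + 2) true
    else if started then score  -- break
    else pvLoopA s1 s2 n offset rest score started

def calculate_end_annealing_py (seq1 : String) (seq2 : String) : Int :=
  let s1 := (PySem.Str.upper seq1).toList
  let s2 := (PySem.Str.upper seq2).toList
  let lenDiff : Int := (s1.length : Int) - (s2.length : Int)
  let s1 := if lenDiff < 0 then List.replicate lenDiff.natAbs 'N' ++ s1 else s1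
  let s2 := if lenDiff > 0 then List.replicate lenDiff.natAbs 'N' ++ s2 else s2
  let n := s2.length
  (List.range n).foldl
    (fun maxScore offset =>
      let score := pvLoopA s1 s2 n offset (List.range (n - offset)) 0 false
      if score > maxScore then score else maxScore) 0

-- ===== PORT B =====
-- _PAIR_SCORE.get((b1, b2), 0) from Source B
def pvPairScore (b1 b2 : Char) : Int :=
  if b1 = 'G' ∧ b2 = 'C' then 4
  else if b1 = 'C' ∧ b2 = 'G' then 4
  else if b1 = 'A' ∧ b2 = 'T' then 2
  else if b1 = 'T' ∧ b2 = 'A' then 2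
  else 0

-- _first_run_sum from Source B: the two while loops drop leading zeros and take the
-- following nonzero run; ported as dropWhile/takeWhile + sum.
def pvFirstRunSum (xs : List Int) : Int :=
  ((xs.dropWhile (· == 0)).takeWhile (· != 0)).sum

def calculate_end_annealing_py_alt (seq1 : String) (seq2 : String) : Int :=
  let s1 := (PySem.Str.upper seq1).toList
  let s2 := (PySem.Str.upper seq2).toList
  let lenDiff : Int := (s1.length : Int) - (s2.length : Int)
  let s1 := if lenDiff < 0 then List.replicate lenDiff.natAbs 'N' ++ s1 else s1
  let s2 := if lenDiff > 0 then List.replicate lenDiff.natAbs 'N' ++ s2 else s2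
  let n := s2.length
  (List.range n).foldl
    (fun best offset =>
      let diag := (List.range (n - offset)).map
        (fun i => pvPairScore (s1.getD i ' ') (s2.getD (n - 1 - i - offset) ' '))
      max best (pvFirstRunSum diag)) 0

-- ===== PRECONDITION & SPEC =====
def Spec_calculate_end_annealing_py (seq1 : String) (seq2 : String) (out : Int) : Prop := out = calculate_end_annealing_py_alt seq1 seq2
instance (seq1 : String) (seq2 : String) (out : Int) : Decidable (Spec_calculate_end_annealing_py seq1 seq2 out) := by unfold Spec_calculate_end_annealing_py; infer_instance

-- ===== CLAIM (what is proved, stated in full; the proofs are below) =====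
def Claim_equal_calculate_end_annealing_py : Prop := ∀ (seq1 : String) (seq2 : String), Dom_calculate_end_annealing_py seq1 seq2 → Spec_calculate_end_annealing_py seq1 seq2 (calculate_end_annealing_py seq1 seq2)

-- ===== LEMMAS AND PROOFS =====

-- abstract version of A's inner loop, over the list of per-position pair scores
def pvRun : List Int → Int → Bool → Int
  | [], sc, _ => sc
  | x :: r, sc, st =>
    if x ≠ 0 then pvRun r (sc + x) true
    else if st then sc
    else pvRun r sc st

lemma pvLoopA_eq_pvRun (s1 s2 : List Char) (n offset : Nat) :
    ∀ (l : List Nat) (sc : Int) (st : Bool),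
      pvLoopA s1 s2 n offset l sc st =
      pvRun (l.map (fun i => pvPairScore (s1.getD i ' ') (s2.getD (n - 1 - i - offset) ' '))) sc st := by
  intro l
  induction l with
  | nil => intro sc st; rfl
  | cons i rest ih =>
    intro sc st
    by_cases h1 : (s1.getD i ' ' = 'G' ∧ s2.getD (n - 1 - i - offset) ' ' = 'C') ∨
        (s1.getD i ' ' = 'C' ∧ s2.getD (n - 1 - i - offset) ' ' = 'G')
    · have hx : pvPairScore (s1.getD i ' ') (s2.getD (n - 1 - i - offset) ' ') = 4 := by
        rcases h1 with ⟨ha, hb⟩ | ⟨ha, hb⟩ <;> rw [ha, hb] <;> decide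
      rw [List.map_cons, hx]
      simp only [pvLoopA]
      rw [if_pos h1]
      simp only [pvRun]
      norm_num
      exact ih (sc + 4) true
    · by_cases h2 : (s1.getD i ' ' = 'A' ∧ s2.getD (n - 1 - i - offset) ' ' = 'T') ∨
          (s1.getD i ' ' = 'T' ∧ s2.getD (n - 1 - i - offset) ' ' = 'A')
      · have hx : pvPairScore (s1.getD i ' ') (s2.getD (n - 1 - i - offset) ' ') = 2 := by
          rcases h2 with ⟨ha, hb⟩ | ⟨ha, hb⟩ <;> rw [ha, hb] <;> decide
        rw [List.map_cons, hx]
        simp only [pvLoopA]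
        rw [if_neg h1, if_pos h2]
        simp only [pvRun]
        norm_num
        exact ih (sc + 2) true
      · have hx : pvPairScore (s1.getD i ' ') (s2.getD (n - 1 - i - offset) ' ') = 0 := by
          simp only [pvPairScore,
            if_neg (fun h => h1 (Or.inl h)), if_neg (fun h => h1 (Or.inr h)),
            if_neg (fun h => h2 (Or.inl h)), if_neg (fun h => h2 (Or.inr h))]
        rw [List.map_cons, hx]
        simp only [pvLoopA]
        rw [if_neg h1, if_neg h2]
        simp only [pvRun]
        norm_num
        cases st
        · simpa using ih sc false
        · simp

lemma pvRun_true (l : List Int) : ∀ sc : Int,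
    pvRun l sc true = sc + (l.takeWhile (· != 0)).sum := by
  induction l with
  | nil => intro sc; simp [pvRun]
  | cons x r ih =>
    intro sc
    by_cases h : x = 0
    · have hx : (x != 0) = false := by simp [h]
      simp [pvRun, h, List.takeWhile]
    · have hx : (x != 0) = true := by simp [h]
      simp [pvRun, h, List.takeWhile, hx, ih]
      ring

lemma pvRun_false (l : List Int) : ∀ sc : Int,
    pvRun l sc false = sc + pvFirstRunSum l := by
  induction l with
  | nil => intro sc; simp [pvRun, pvFirstRunSum]
  | cons x r ih =>
    intro sc
    by_cases h : x = 0
    · have hx : (x == 0) = true := by simp [h]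
      simp [pvRun, h, pvFirstRunSum, List.dropWhile]
      have := ih sc
      simp [pvFirstRunSum] at this
      simpa using this
    · have hx : (x == 0) = false := by simp [h]
      have hx' : (x != 0) = true := by simp [h]
      simp [pvRun, h, pvFirstRunSum, List.dropWhile, hx, hx', pvRun_true]
      ring

lemma per_offset_eq (s1 s2 : List Char) (n offset : Nat) :
    pvLoopA s1 s2 n offset (List.range (n - offset)) 0 false =
    pvFirstRunSum ((List.range (n - offset)).map
      (fun i => pvPairScore (s1.getD i ' ') (s2.getD (n - 1 - i - offset) ' '))) := by
  rw [pvLoopA_eq_pvRun, pvRun_false]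
  ring

lemma if_gt_eq_max (m s : Int) : (if s > m then s else m) = max m s := by
  split <;> omega

lemma fold_core (s1 s2 : List Char) (n : Nat) :
    (List.range n).foldl
      (fun maxScore offset =>
        let score := pvLoopA s1 s2 n offset (List.range (n - offset)) 0 false
        if score > maxScore then score else maxScore) 0 =
    (List.range n).foldl
      (fun best offset =>
        let diag := (List.range (n - offset)).map
          (fun i => pvPairScore (s1.getD i ' ') (s2.getD (n - 1 - i - offset) ' '))
        max best (pvFirstRunSum diag)) 0 := by
  have h : (fun (maxScore : Int) (offset : Nat) =>
        let score := pvLoopA s1 s2 n offset (List.range (n - offset)) 0 false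
        if score > maxScore then score else maxScore) =
      (fun (best : Int) (offset : Nat) =>
        let diag := (List.range (n - offset)).map
          (fun i => pvPairScore (s1.getD i ' ') (s2.getD (n - 1 - i - offset) ' '))
        max best (pvFirstRunSum diag)) := by
    funext m off
    simp only [per_offset_eq, if_gt_eq_max]
  rw [h]

-- ===== VERDICT (by name: the statement is the Claim_ definition above) =====
theorem calculate_end_annealing_py_spec : Claim_equal_calculate_end_annealing_py := by
  intro seq1 seq2 _
  show calculate_end_annealing_py seq1 seq2 = calculate_end_annealing_py_alt seq1 seq2
  simp only [calculate_end_annealing_py, calculate_end_annealing_py_alt]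
  exact fold_core _ _ _
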